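-- pv_equiv track=rewrite | github.com/administration-solrep/signale | zam-repondeur-1.17.7/zam_repondeur/services/fetch/senat/amendements.py | _merge_badly_split_chunks
-- ===== SOURCE A (Python) =====
-- from typing import Any, Dict, Iterable, List, Optional, Tuple
--
-- def _merge_badly_split_chunks(chunks: Iterable[str]) -> Iterable[str]:
--     chunks = iter(chunks)
--     for chunk in chunks:
--         while chunk.startswith("<body>") and not chunk.rstrip().endswith("</body>"):
--             try:
--                 chunk += " " + next(chunks)
--             except StopIteration:
--                 break
--         yield chunk
-- ===== SOURCE B (Python) =====
-- def _merge_badly_split_chunks(chunks):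
--     pending = None
--     for chunk in chunks:
--         pending = chunk if pending is None else pending + " " + chunk
--         if not (pending.startswith("<body>") and not pending.rstrip().endswith("</body>")):
--             yield pending
--             pending = None
--     if pending is not None:
--         yield pending
-- ===== Notes on version B (the rewrite author's own statement) =====
-- stated objective: simpler
-- what changed: Replaces the nested while loop that pulls extra chunks from the shared iterator with next() and a StopIteration handler by a single flat pass keeping a 'pending' accumulator that is flushed when the merge condition no longer holds (plus a final flush).
import Mathlib
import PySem

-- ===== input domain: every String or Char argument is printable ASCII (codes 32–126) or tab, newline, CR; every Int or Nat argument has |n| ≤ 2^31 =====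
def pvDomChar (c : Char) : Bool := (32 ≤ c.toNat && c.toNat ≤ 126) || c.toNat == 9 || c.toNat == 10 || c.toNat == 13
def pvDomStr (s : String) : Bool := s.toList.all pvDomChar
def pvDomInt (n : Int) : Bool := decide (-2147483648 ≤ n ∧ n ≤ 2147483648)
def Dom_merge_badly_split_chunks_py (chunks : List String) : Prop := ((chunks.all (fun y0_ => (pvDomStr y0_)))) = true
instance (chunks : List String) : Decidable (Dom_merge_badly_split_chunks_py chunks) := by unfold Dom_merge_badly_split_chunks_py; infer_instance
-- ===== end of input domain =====

-- B replaces A's nested while/next() pull from a shared iterator by a single flat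
-- pass with a 'pending' accumulator (objective: simpler decomposition, same cost).

-- shared condition: chunk starts with "<body>" and does not (after rstrip) end with "</body>"
def pvIsOpenUnclosed (s : String) : Bool :=
  PySem.Str.startswith s "<body>" && !(PySem.Str.endswith (PySem.Str.rstrip s) "</body>")

-- ===== PORT A =====
-- inner `while` of A: keep pulling the next chunk from the iterator while the
-- condition holds; returns the merged chunk and the remaining iterator contents
def pvAbsorb (chunk : String) (rest : List String) : String × List String :=
  if pvIsOpenUnclosed chunk then
    match rest with
    | [] => (chunk, rest)          -- StopIteration: break
    | c :: cs => pvAbsorb (chunk ++ " " ++ c) cs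
  else (chunk, rest)

theorem pvAbsorb_len (chunk : String) (rest : List String) :
    (pvAbsorb chunk rest).2.length ≤ rest.length := by
  induction rest generalizing chunk with
  | nil => unfold pvAbsorb; split <;> simp
  | cons c cs ih =>
    unfold pvAbsorb
    split
    · exact le_trans (ih _) (by simp)
    · simp

def merge_badly_split_chunks_py (chunks : List String) : List String :=
  match chunks with
  | [] => []
  | c :: cs =>
    (pvAbsorb c cs).1 :: merge_badly_split_chunks_py (pvAbsorb c cs).2
termination_by chunks.length
decreasing_by
  simpa using Nat.lt_succ_of_le (pvAbsorb_len c cs)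

-- ===== PORT B =====
-- single flat pass with a `pending` accumulator, flushed when the merge
-- condition no longer holds, plus a final flush
def pvLoopB (pending : Option String) (chunks : List String) : List String :=
  match chunks with
  | [] =>
    match pending with
    | none => []
    | some p => [p]
  | c :: cs =>
    let p := match pending with
      | none => c
      | some q => q ++ " " ++ c
    if pvIsOpenUnclosed p then pvLoopB (some p) cs else p :: pvLoopB none cs

def merge_badly_split_chunks_py_alt (chunks : List String) : List String :=
  pvLoopB none chunks

-- ===== PRECONDITION & SPEC =====
def Spec_merge_badly_split_chunks_py (chunks : List String) (out : List String) : Prop := out = merge_badly_split_chunks_py_alt chunks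
instance (chunks : List String) (out : List String) : Decidable (Spec_merge_badly_split_chunks_py chunks out) := by unfold Spec_merge_badly_split_chunks_py; infer_instance

-- ===== CLAIM (what is proved, stated in full; the proofs are below) =====
def Claim_equal_merge_badly_split_chunks_py : Prop := ∀ (chunks : List String), Dom_merge_badly_split_chunks_py chunks → Spec_merge_badly_split_chunks_py chunks (merge_badly_split_chunks_py chunks)

-- ===== LEMMAS AND PROOFS =====
theorem pv_key : ∀ (n : Nat) (l : List String), l.length = n →
    merge_badly_split_chunks_py l = pvLoopB none l ∧
    ∀ ch, pvIsOpenUnclosed ch = true →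
      pvLoopB (some ch) l
        = (pvAbsorb ch l).1 :: merge_badly_split_chunks_py (pvAbsorb ch l).2 := by
  intro n
  induction n using Nat.strong_induction_on with
  | _ n ih =>
    intro l hl
    match l with
    | [] =>
      constructor
      · simp [merge_badly_split_chunks_py, pvLoopB]
      · intro ch hch
        simp [pvLoopB, pvAbsorb, hch, merge_badly_split_chunks_py]
    | c :: cs =>
      have hcs : cs.length < n := by simp [← hl]
      have ihcs := ih cs.length hcs cs rfl
      constructor
      · rw [merge_badly_split_chunks_py]
        show _ = if pvIsOpenUnclosed c then pvLoopB (some c) cs else c :: pvLoopB none cs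
        by_cases hc : pvIsOpenUnclosed c = true
        · rw [if_pos hc, ihcs.2 c hc]
        · rw [if_neg hc]
          have : pvAbsorb c cs = (c, cs) := by
            unfold pvAbsorb
            rw [if_neg hc]
          rw [this, ihcs.1]
      · intro ch hch
        show (if pvIsOpenUnclosed (ch ++ " " ++ c) then pvLoopB (some (ch ++ " " ++ c)) cs
              else (ch ++ " " ++ c) :: pvLoopB none cs) = _
        have habs : pvAbsorb ch (c :: cs) = pvAbsorb (ch ++ " " ++ c) cs := by
          conv_lhs => unfold pvAbsorb
          rw [if_pos hch]
        rw [habs]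
        by_cases hp : pvIsOpenUnclosed (ch ++ " " ++ c) = true
        · rw [if_pos hp, ihcs.2 _ hp]
        · rw [if_neg hp]
          have : pvAbsorb (ch ++ " " ++ c) cs = (ch ++ " " ++ c, cs) := by
            unfold pvAbsorb
            rw [if_neg hp]
          rw [this, ihcs.1]

-- ===== VERDICT (by name: the statement is the Claim_ definition above) =====
theorem merge_badly_split_chunks_py_spec : Claim_equal_merge_badly_split_chunks_py := by
  intro chunks _
  unfold Spec_merge_badly_split_chunks_py merge_badly_split_chunks_py_alt
  exact (pv_key chunks.length chunks rfl).1
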